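-- pv_equiv track=rewrite | github.com/EchoNoName/code_python | Week_4/Q5.py | patternMaker
-- ===== SOURCE A (Python) =====
-- def patternMaker(n):
--     '''Creates a pattern based on an inputed intger
--
--     args:
--         n: # of lines the pattern goes on for
--
--     returns:
--         pattern: The full pattern the fuction makes, starting of with the number of lines, then n lines of alternating 1s and 0s that are the length of the line #'''
--     line = ''
--     pattern = f"N = {n} \n\n"
--     for i in range(n):
--         if i % 2 == 0:
--             line += '1'
--         else:
--             line += '0'
--         pattern += f'{line} \n'
--     return(pattern)
-- ===== SOURCE B (Python) =====
-- def patternMaker(n):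
--     base = '10' * ((n + 1) // 2)
--     return f"N = {n} \n\n" + ''.join(base[:i + 1] + ' \n' for i in range(n))
-- ===== Notes on version B (the rewrite author's own statement) =====
-- stated objective: simpler
-- what changed: Instead of mutating a growing line accumulator and appending to the pattern inside one loop, B precomputes the master alternating string '10'*((n+1)//2) once and joins its prefixes base[:i+1] plus ' ' onto the header.
import Mathlib
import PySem

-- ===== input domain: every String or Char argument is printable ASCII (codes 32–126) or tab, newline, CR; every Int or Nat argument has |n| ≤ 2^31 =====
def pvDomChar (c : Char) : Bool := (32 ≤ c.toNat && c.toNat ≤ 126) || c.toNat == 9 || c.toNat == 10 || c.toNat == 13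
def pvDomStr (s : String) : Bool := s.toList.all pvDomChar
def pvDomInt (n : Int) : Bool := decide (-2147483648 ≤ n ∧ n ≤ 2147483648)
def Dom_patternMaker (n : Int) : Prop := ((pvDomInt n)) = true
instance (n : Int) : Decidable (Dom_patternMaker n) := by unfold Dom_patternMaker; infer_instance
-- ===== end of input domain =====

-- B replaces A's mutated accumulator string with one precomputed master
-- alternating string '10'*((n+1)//2) whose prefixes are joined (objective: simpler).

-- ===== PORT A =====
-- All string work is done over List Char (exact: the text is ASCII digits/spaces/newlines),
-- assembled into a String at the very end.
-- f"N = {n} \n\n"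
def pmHeader (n : Int) : List Char :=
  ['N', ' ', '=', ' '] ++ PySem.Int.toChars n ++ [' ', '\n', '\n']

-- one loop iteration of A: state = (line, pattern)
def pmStepA (st : List Char × List Char) (i : Int) : List Char × List Char :=
  let line := st.1 ++ (if PySem.Int.mod i 2 = 0 then ['1'] else ['0'])
  (line, st.2 ++ (line ++ [' ', '\n']))

def patternMaker (n : Int) : String :=
  String.ofList ((PySem.List.pyRange 0 n 1).foldl pmStepA ([], pmHeader n)).2

-- ===== PORT B =====
-- '10' * m  (Python string repetition: empty for m ≤ 0, which Int.toNat gives)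
def pmBase (m : Int) : List Char :=
  (List.range m.toNat).flatMap (fun _ => ['1', '0'])

def patternMaker_alt (n : Int) : String :=
  let base := pmBase (PySem.Int.floordiv (n + 1) 2)
  String.ofList
    ((['N', ' ', '=', ' '] ++ PySem.Int.toChars n ++ [' ', '\n', '\n']) ++
      (((PySem.List.pyRange 0 n 1).map
        (fun i => PySem.List.slice base none (some (i + 1)) ++ [' ', '\n'])).flatten))

-- ===== PRECONDITION & SPEC =====
def Spec_patternMaker (n : Int) (out : String) : Prop := out = patternMaker_alt n
instance (n : Int) (out : String) : Decidable (Spec_patternMaker n out) := by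
  unfold Spec_patternMaker; infer_instance

-- ===== CLAIM (what is proved, stated in full; the proofs are below) =====
def Claim_equal_patternMaker : Prop := ∀ (n : Int), Dom_patternMaker n → Spec_patternMaker n (patternMaker n)

-- ===== LEMMAS AND PROOFS =====

def altChar (j : Nat) : Char := if j % 2 = 0 then '1' else '0'
def altList (K : Nat) : List Char := (List.range K).map altChar
def linesList (K : Nat) : List Char :=
  (List.range K).flatMap (fun j => altList (j + 1) ++ [' ', '\n'])

theorem altList_succ (K : Nat) : altList (K + 1) = altList K ++ [altChar K] := by
  simp [altList, List.range_succ]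

theorem base_eq_alt (m : Nat) :
    (List.range m).flatMap (fun _ => ['1', '0']) = altList (2 * m) := by
  induction m with
  | zero => simp [altList]
  | succ k ih =>
      have e1 : altChar (2 * k) = '1' := by unfold altChar; rw [if_pos (by omega)]
      have e2 : altChar (2 * k + 1) = '0' := by unfold altChar; rw [if_neg (by omega)]
      have h2 : 2 * (k + 1) = (2 * k + 1) + 1 := by ring
      rw [List.range_succ, List.flatMap_append, ih, h2, altList_succ, altList_succ, e1, e2]
      simp

theorem take_altList {t N : Nat} (h : t ≤ N) : (altList N).take t = altList t := by
  simp [altList, ← List.map_take, List.take_range, Nat.min_eq_left h]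

theorem modInt_natCast_two (K : Nat) :
    PySem.Int.mod (K : Int) 2 = ((K % 2 : Nat) : Int) := by
  exact_mod_cast PySem.Int.mod_natCast K 2

theorem foldA_closed (H : List Char) (K : Nat) :
    ((List.range K).map (fun (k : Nat) => (k : Int))).foldl pmStepA ([], H)
      = (altList K, H ++ linesList K) := by
  induction K with
  | zero => simp [altList, linesList]
  | succ k ih =>
      rw [List.range_succ, List.map_append, List.foldl_append, ih]
      simp only [List.map_cons, List.map_nil, List.foldl_cons, List.foldl_nil, pmStepA]
      rw [modInt_natCast_two]
      have hif : (if ((k % 2 : Nat) : Int) = 0 then ['1'] else ['0']) = [altChar k] := by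
        unfold altChar
        split_ifs with h1 h2 h2 <;> first | rfl | (exfalso; omega)
      rw [hif, ← altList_succ]
      have hlines : linesList (k + 1) = linesList k ++ (altList (k + 1) ++ [' ', '\n']) := by
        rw [linesList, List.range_succ, List.flatMap_append]
        simp [linesList]
      rw [hlines]
      simp

theorem patternMaker_lists (n : Int) :
    patternMaker n = patternMaker_alt n := by
  unfold patternMaker patternMaker_alt
  by_cases hn : n ≤ 0
  · rw [PySem.List.pyRange_one_eq_nil hn]
    simp [pmHeader]
  · have hn' : 0 < n := by omega
    set K := n.toNat with hK
    have hnK : n = (K : Int) := by omega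
    congr 1
    rw [PySem.List.pyRange_one]
    have hsub : (n - 0).toNat = K := by omega
    rw [hsub]
    -- B side: the joined prefixes equal linesList K
    have hM : (PySem.Int.floordiv (n + 1) 2).toNat = (K + 1) / 2 := by
      have : PySem.Int.floordiv (n + 1) 2 = (((K + 1) / 2 : Nat) : Int) := by
        rw [hnK]
        exact_mod_cast PySem.Int.floordiv_natCast (K + 1) 2
      omega
    have hbase : pmBase (PySem.Int.floordiv (n + 1) 2) = altList (2 * ((K + 1) / 2)) := by
      rw [pmBase, hM, base_eq_alt]
    have hL : ((List.map
          (fun i => PySem.List.slice (pmBase (PySem.Int.floordiv (n + 1) 2)) none (some (i + 1)) ++ [' ', '\n'])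
          ((List.range K).map (fun (k : Nat) => (0 : Int) + (k : Int)))).flatten) = linesList K := by
      rw [hbase, linesList, List.flatMap_def, List.map_map]
      congr 1
      apply List.map_congr_left
      intro k hk
      have hkK : k < K := List.mem_range.mp hk
      have hcast : (0 : Int) + (k : Int) + 1 = ((k + 1 : Nat) : Int) := by push_cast; ring
      simp only [Function.comp_apply]
      rw [hcast, PySem.List.slice_to_natCast, take_altList (by omega)]
    rw [hL]
    -- A side
    have hmapA : (List.range K).map (fun (k : Nat) => (0 : Int) + (k : Int))
        = (List.range K).map (fun (k : Nat) => (k : Int)) := by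
      simp
    rw [hmapA, foldA_closed]
    simp [pmHeader]

-- ===== VERDICT (by name: the statement is the Claim_ definition above) =====
theorem patternMaker_spec : Claim_equal_patternMaker := by
  intro n _
  unfold Spec_patternMaker
  exact patternMaker_lists n
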